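-- pv_equiv track=rewrite | github.com/wannabethere/asthera | agents/app/indexing/enrich_mdl_with_llm.py | extract_struct_definition_string
-- ===== SOURCE A (Python) =====
-- from typing import Dict, List, Optional, Any
--
-- def extract_struct_definition_string(sql_content: str, start_pos: int) -> tuple[Optional[str], int]:
--     """
--     Extract a complete STRUCT definition string, handling nested STRUCTs.
--
--     Args:
--         sql_content: SQL content to search
--         start_pos: Position where 'STRUCT<' starts
--
--     Returns:
--         Tuple of (struct_string, end_position) or (None, start_pos) if not found
--     """
--     if not sql_content[start_pos:start_pos+7].upper().startswith('STRUCT'):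
--         return None, start_pos
--
--     # Find the opening '<'
--     i = start_pos + 6  # After 'STRUCT'
--     while i < len(sql_content) and sql_content[i] in ' \t':
--         i += 1
--
--     if i >= len(sql_content) or sql_content[i] != '<':
--         return None, start_pos
--
--     # Now find the matching '>', accounting for nested '<' and '>'
--     depth = 1
--     i += 1
--     start = i
--
--     while i < len(sql_content) and depth > 0:
--         if sql_content[i] == '<':
--             depth += 1
--         elif sql_content[i] == '>':
--             depth -= 1
--         i += 1
--
--     if depth == 0:
--         # Found matching '>'
--         struct_str = 'STRUCT<' + sql_content[start:i-1] + '>'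
--         return struct_str, i
--     else:
--         # Unmatched brackets
--         return None, start_pos
-- ===== SOURCE B (Python) =====
-- def extract_struct_definition_string(sql_content, start_pos):
--     if not sql_content[start_pos:start_pos+7].upper().startswith('STRUCT'):
--         return None, start_pos
--
--     n = len(sql_content)
--     i = start_pos + 6
--     while i < n and sql_content[i] in ' \t':
--         i += 1
--
--     if i >= n or sql_content[i] != '<':
--         return None, start_pos
--
--     # Delimiter-jumping scan: instead of stepping one character at a time,
--     # jump straight to the next '<' or '>' with str.find.
--     start = i + 1
--     i = start
--     depth = 1
--     while depth > 0:
--         lt = sql_content.find('<', i)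
--         gt = sql_content.find('>', i)
--         if gt == -1:
--             return None, start_pos
--         if lt != -1 and lt < gt:
--             depth += 1
--             i = lt + 1
--         else:
--             depth -= 1
--             i = gt + 1
--
--     return 'STRUCT<' + sql_content[start:i-1] + '>', i
-- ===== Notes on version B (the rewrite author's own statement) =====
-- stated objective: alternative
-- what changed: The character-by-character depth loop is replaced by a delimiter-jumping loop that uses str.find to hop directly from one '<'/'>' to the next, adjusting depth per bracket found instead of inspecting every character.
-- outside the precondition, e.g. on extract_struct_definition_string('>xSTRUCT<a', -8): A returns ('STRUCT<>', 1), B returns (None, -8)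
import Mathlib
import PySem

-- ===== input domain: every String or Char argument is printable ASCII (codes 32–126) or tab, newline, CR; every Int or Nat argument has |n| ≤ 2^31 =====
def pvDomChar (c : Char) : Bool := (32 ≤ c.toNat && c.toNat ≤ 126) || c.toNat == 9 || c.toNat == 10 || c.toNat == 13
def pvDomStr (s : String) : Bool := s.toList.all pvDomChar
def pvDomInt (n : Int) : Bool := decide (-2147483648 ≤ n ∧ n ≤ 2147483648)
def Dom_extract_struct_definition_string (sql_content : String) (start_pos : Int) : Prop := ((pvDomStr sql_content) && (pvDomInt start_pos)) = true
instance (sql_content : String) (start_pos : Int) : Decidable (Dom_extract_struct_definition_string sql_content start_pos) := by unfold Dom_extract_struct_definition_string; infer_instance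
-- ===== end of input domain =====

-- B replaces A's character-by-character depth loop with a delimiter-jumping loop
-- that hops from one '<'/'>' bracket to the next via str.find (objective: alternative).

-- ===== PORT A =====

-- A's whitespace-skip loop: while i < len(s) and s[i] in ' \t': i += 1
-- (default '#' of pyGetD is never read: the loop guard ensures the index is in range)
def aSkip (cs : List Char) (i : Int) : Int :=
  if _h : i < (cs.length : Int) ∧ (PySem.List.pyGetD cs i '#' = ' ' ∨ PySem.List.pyGetD cs i '#' = '\t') then
    aSkip cs (i + 1)
  else i
termination_by ((cs.length : Int) - i).toNat
decreasing_by omega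

-- A's main loop: while i < len(s) and depth > 0: adjust depth by s[i]; i += 1
def aLoop (cs : List Char) (i depth : Int) : Int × Int :=
  if _h : i < (cs.length : Int) ∧ 0 < depth then
    let c := PySem.List.pyGetD cs i '#'
    let depth' := if c = '<' then depth + 1 else if c = '>' then depth - 1 else depth
    aLoop cs (i + 1) depth'
  else (i, depth)
termination_by ((cs.length : Int) - i).toNat
decreasing_by omega

def extract_struct_definition_string (sql_content : String) (start_pos : Int) : Option String × Int :=
  let cs := sql_content.toList
  if ¬ (PySem.Chars.startswith (PySem.Chars.upper (PySem.List.slice cs (some start_pos) (some (start_pos + 7)))) "STRUCT".toList) then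
    (none, start_pos)
  else
    let i := aSkip cs (start_pos + 6)
    if (cs.length : Int) ≤ i ∨ PySem.List.pyGetD cs i '#' ≠ '<' then (none, start_pos)
    else
      let r := aLoop cs (i + 1) 1
      if r.2 = 0 then
        (some (String.ofList ("STRUCT<".toList ++ PySem.List.slice cs (some (i + 1)) (some (r.1 - 1)) ++ ['>'])), r.1)
      else (none, start_pos)

-- ===== PORT B =====

-- exact on nonempty sub: a found occurrence starts strictly before the end
lemma find_lt_length_of_ne {s sub : List Char} (hsub : sub ≠ [])
    (h : PySem.Chars.find s sub ≠ -1) : PySem.Chars.find s sub < (s.length : Int) := by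
  have hle := PySem.Chars.find_le_length s sub
  have hge := PySem.Chars.neg_one_le_find s sub
  rcases lt_or_eq_of_le hle with hlt | heq
  · exact hlt
  · exfalso
    have h0 : 0 ≤ PySem.Chars.find s sub := by omega
    have hsp := (PySem.Chars.find_spec h0).1
    rw [heq] at hsp
    simp at hsp
    exact hsub hsp

-- bounds of Source B's str.find(sub, i): a hit lies in [max i 0, len) (used for termination of bLoop)
lemma ff_core (cs sub : List Char) (st : Int) (hsub : sub ≠ []) (hst : 0 ≤ st)
    (h : PySem.Chars.find (List.drop st.toNat (List.take ((cs.length : Int)).toNat cs)) sub ≠ -1) :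
    0 ≤ PySem.Chars.find (List.drop st.toNat (List.take ((cs.length : Int)).toNat cs)) sub ∧
      st + PySem.Chars.find (List.drop st.toNat (List.take ((cs.length : Int)).toNat cs)) sub < (cs.length : Int) := by
  have hge := PySem.Chars.neg_one_le_find (List.drop st.toNat (List.take ((cs.length : Int)).toNat cs)) sub
  have hlt := find_lt_length_of_ne hsub h
  have hlen : (List.drop st.toNat (List.take ((cs.length : Int)).toNat cs)).length = cs.length - st.toNat := by
    simp
  rw [hlen] at hlt
  omega

lemma findFrom_bounds (cs sub : List Char) (i : Int) (hsub : sub ≠ [])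
    (h : PySem.Chars.findFrom cs sub i none ≠ -1) :
    i ≤ PySem.Chars.findFrom cs sub i none ∧ 0 ≤ PySem.Chars.findFrom cs sub i none ∧
      PySem.Chars.findFrom cs sub i none < (cs.length : Int) := by
  unfold PySem.Chars.findFrom at h ⊢
  simp only at h ⊢
  split_ifs at h ⊢ with h1 h2
  all_goals try exact absurd rfl h
  · have := ff_core cs sub 0 hsub le_rfl (by assumption)
    omega
  · have := ff_core cs sub (i + (cs.length : Int)) hsub (by omega) (by assumption)
    omega
  · have := ff_core cs sub i hsub (by omega) (by assumption)
    omega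

def bSkip (cs : List Char) (i : Int) : Int :=
  if _h : i < (cs.length : Int) ∧ (PySem.List.pyGetD cs i '#' = ' ' ∨ PySem.List.pyGetD cs i '#' = '\t') then
    bSkip cs (i + 1)
  else i
termination_by ((cs.length : Int) - i).toNat
decreasing_by omega

-- B's delimiter-jumping loop: while depth > 0: jump to the nearer of find('<',i)/find('>',i)
def bLoop (cs : List Char) (i depth : Int) : Option Int :=
  if _hd : 0 < depth then
    let lt := PySem.Chars.findFrom cs ['<'] i none
    let gt := PySem.Chars.findFrom cs ['>'] i none
    if hgt : gt = -1 then none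
    else if hlt : lt ≠ -1 ∧ lt < gt then bLoop cs (lt + 1) (depth + 1)
    else bLoop cs (gt + 1) (depth - 1)
  else some i
termination_by ((cs.length : Int) - i).toNat
decreasing_by
  · have := findFrom_bounds cs ['<'] i (by simp) hlt.1
    omega
  · have := findFrom_bounds cs ['>'] i (by simp) hgt
    omega

def extract_struct_definition_string_alt (sql_content : String) (start_pos : Int) : Option String × Int :=
  let cs := sql_content.toList
  if ¬ (PySem.Chars.startswith (PySem.Chars.upper (PySem.List.slice cs (some start_pos) (some (start_pos + 7)))) "STRUCT".toList) then
    (none, start_pos)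
  else
    let i := bSkip cs (start_pos + 6)
    if (cs.length : Int) ≤ i ∨ PySem.List.pyGetD cs i '#' ≠ '<' then (none, start_pos)
    else
      let start := i + 1
      match bLoop cs start 1 with
      | none => (none, start_pos)
      | some j => (some (String.ofList ("STRUCT<".toList ++ PySem.List.slice cs (some start) (some (j - 1)) ++ ['>'])), j)

-- ===== PRECONDITION & SPEC =====
-- Pre_ admits every nonnegative start position (the function's natural domain: start_pos is
-- documented as the position where 'STRUCT<' starts) and also any input whose 7-char window at
-- start_pos does not spell 'STRUCT'.  It excludes only negative start_pos whose window does spell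
-- 'STRUCT': there Python's negative-index semantics make A's scan wrap around to the front of the
-- string, an accidental behaviour no caller would specify, and the two programs can differ.
def Pre_extract_struct_definition_string (sql_content : String) (start_pos : Int) : Prop :=
  0 ≤ start_pos ∨
    ¬ (PySem.Chars.startswith (PySem.Chars.upper (PySem.List.slice sql_content.toList (some start_pos) (some (start_pos + 7)))) "STRUCT".toList)
instance (sql_content : String) (start_pos : Int) : Decidable (Pre_extract_struct_definition_string sql_content start_pos) := by unfold Pre_extract_struct_definition_string; infer_instance

def pvWitness_extract_struct_definition_string : String × Int := ("STRUCT<a INT64, b STRUCT<c STRING>>", 0)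

def Spec_extract_struct_definition_string (sql_content : String) (start_pos : Int) (out : Option String × Int) : Prop := out = extract_struct_definition_string_alt sql_content start_pos
instance (sql_content : String) (start_pos : Int) (out : Option String × Int) : Decidable (Spec_extract_struct_definition_string sql_content start_pos out) := by unfold Spec_extract_struct_definition_string; infer_instance

-- ===== CLAIM (what is proved, stated in full; the proofs are below) =====
def Claim_equal_extract_struct_definition_string : Prop := ∀ (sql_content : String) (start_pos : Int), Dom_extract_struct_definition_string sql_content start_pos → Pre_extract_struct_definition_string sql_content start_pos → Spec_extract_struct_definition_string sql_content start_pos (extract_struct_definition_string sql_content start_pos)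

-- ===== LEMMAS AND PROOFS =====

lemma skip_eq (cs : List Char) (i : Int) : aSkip cs i = bSkip cs i := by
  fun_induction aSkip cs i with
  | case1 i h ih => rw [bSkip]; simp only [dif_pos h]; exact ih
  | case2 i h => rw [bSkip]; simp only [dif_neg h]

lemma aSkip_ge (cs : List Char) (i : Int) : i ≤ aSkip cs i := by
  fun_induction aSkip cs i with
  | case1 i h ih => omega
  | case2 i h => omega

-- A's scan over a suffix: number of characters consumed until depth first reaches 0
def aScan : List Char → Int → Option Int
  | [], _ => none
  | c :: t, d =>
    let d' := if c = '<' then d + 1 else if c = '>' then d - 1 else d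
    if d' = 0 then some 1 else (aScan t d').map (· + 1)

-- B's scan over a suffix, jumping between brackets
def bScan (l : List Char) (d : Int) : Option Int :=
  let gt := PySem.Chars.find l ['>']
  let lt := PySem.Chars.find l ['<']
  if hgt : gt = -1 then none
  else if hlt : lt ≠ -1 ∧ lt < gt then (bScan (l.drop (lt.toNat + 1)) (d + 1)).map (· + (lt + 1))
  else if d = 1 then some (gt + 1)
  else (bScan (l.drop (gt.toNat + 1)) (d - 1)).map (· + (gt + 1))
termination_by l.length
decreasing_by
  · have h1 := PySem.Chars.neg_one_le_find l ['>']
    have h2 := find_lt_length_of_ne (s := l) (sub := ['>']) (by simp) hgt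
    simp only [List.length_drop]; omega
  · have h1 := PySem.Chars.neg_one_le_find l ['>']
    have h2 := find_lt_length_of_ne (s := l) (sub := ['>']) (by simp) hgt
    simp only [List.length_drop]; omega

lemma infix_singleton {c : Char} {l : List Char} : [c] <:+: l ↔ c ∈ l := by
  constructor
  · intro h; exact h.subset (by simp)
  · intro h
    obtain ⟨p, q, rfl⟩ := List.append_of_mem h
    exact ⟨p, q, by simp⟩

lemma find_singleton_neg {c : Char} {l : List Char} :
    PySem.Chars.find l [c] = -1 ↔ c ∉ l := by
  rw [PySem.Chars.find_eq_neg_one_iff, infix_singleton]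

lemma prefix_singleton_drop {c : Char} {l : List Char} {j : Nat} :
    [c] <+: l.drop j ↔ l[j]? = some c := by
  rw [← List.head?_drop]
  cases l.drop j with
  | nil => simp
  | cons x t => simp [List.cons_prefix_cons, eq_comm]

lemma find_singleton_spec {c : Char} {l : List Char} (h : PySem.Chars.find l [c] ≠ -1) :
    l[(PySem.Chars.find l [c]).toNat]? = some c ∧
      ∀ j < (PySem.Chars.find l [c]).toNat, l[j]? ≠ some c := by
  have h0 : 0 ≤ PySem.Chars.find l [c] := by
    have := PySem.Chars.neg_one_le_find l [c]; omega
  obtain ⟨h1, h2⟩ := PySem.Chars.find_spec h0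
  refine ⟨prefix_singleton_drop.mp h1, fun j hj hc => h2 j hj (prefix_singleton_drop.mpr hc)⟩

lemma aScan_cons (c : Char) (t : List Char) (d : Int) :
    aScan (c :: t) d =
      (if (if c = '<' then d + 1 else if c = '>' then d - 1 else d) = 0 then some 1
       else (aScan t (if c = '<' then d + 1 else if c = '>' then d - 1 else d)).map (· + 1)) := rfl

-- depth only decreases at '>': without '>' it never reaches 0
lemma aScan_none {l : List Char} : ∀ {d : Int}, 1 ≤ d → '>' ∉ l → aScan l d = none := by
  induction l with
  | nil => intro d _ _; rfl
  | cons c t ih =>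
    intro d hd hmem
    simp only [List.mem_cons, not_or] at hmem
    have hc : c ≠ '>' := fun hh => hmem.1 hh.symm
    rw [aScan_cons]
    simp only [if_neg hc]
    by_cases h : c = '<'
    · simp only [if_pos h]
      rw [if_neg (by omega), ih (by omega) hmem.2]
      rfl
    · simp only [if_neg h]
      rw [if_neg (by omega), ih hd hmem.2]
      rfl

-- A's scan skips bracket-free prefixes unchanged
lemma aScan_append {p : List Char} {rest : List Char} {d : Int} (hd : 1 ≤ d)
    (hp : ∀ c ∈ p, c ≠ '<' ∧ c ≠ '>') :
    aScan (p ++ rest) d = (aScan rest d).map (· + (p.length : Int)) := by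
  induction p with
  | nil => simp [Option.map_id']
  | cons c t ih =>
    have hc := hp c (by simp)
    simp only [List.cons_append]
    rw [aScan_cons]
    simp only [if_neg hc.1, if_neg hc.2, if_neg (show ¬ d = 0 by omega)]
    rw [ih (fun x hx => hp x (by simp [hx]))]
    cases aScan rest d
    · rfl
    · simp only [Option.map_some, Option.some.injEq, List.length_cons]
      push_cast
      ring

lemma scan_eq (l : List Char) (d : Int) (hd : 1 ≤ d) : aScan l d = bScan l d := by
  rw [bScan]
  by_cases hgt : PySem.Chars.find l ['>'] = -1
  · simp only [dif_pos hgt]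
    exact aScan_none hd (find_singleton_neg.mp hgt)
  · simp only [dif_neg hgt]
    set gt := PySem.Chars.find l ['>'] with hgtdef
    set lt := PySem.Chars.find l ['<'] with hltdef
    have hgt0 : 0 ≤ gt := by have := PySem.Chars.neg_one_le_find l ['>']; omega
    have hgtlen : gt < (l.length : Int) := find_lt_length_of_ne (by simp) hgt
    obtain ⟨hgat, hgbefore⟩ := find_singleton_spec (c := '>') (l := l) hgt
    by_cases hlt : lt ≠ -1 ∧ lt < gt
    · -- nearest bracket is '<' at lt
      simp only [dif_pos hlt]
      have hlt0 : 0 ≤ lt := by have := PySem.Chars.neg_one_le_find l ['<']; omega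
      obtain ⟨hlat, hlbefore⟩ := find_singleton_spec (c := '<') (l := l) hlt.1
      have hltn : lt.toNat < l.length := by omega
      have hdec : l = l.take lt.toNat ++ '<' :: l.drop (lt.toNat + 1) := by
        conv_lhs => rw [← List.take_append_drop lt.toNat l]
        rw [List.drop_eq_getElem_cons hltn]
        have : l[lt.toNat] = '<' := by
          have := hlat; rw [List.getElem?_eq_getElem hltn] at this; exact Option.some.inj this
        rw [this]
      have hfree : ∀ c ∈ l.take lt.toNat, c ≠ '<' ∧ c ≠ '>' := by
        intro c hc
        obtain ⟨j, hj, rfl⟩ := List.mem_iff_getElem.mp hc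
        have hjlen : j < l.length := by simp at hj; omega
        have hjlt : j < lt.toNat := by simp at hj; omega
        have hget : (l.take lt.toNat)[j] = l[j] := List.getElem_take
        rw [hget]
        constructor
        · intro hh
          exact hlbefore j hjlt (by rw [List.getElem?_eq_getElem hjlen, hh])
        · intro hh
          exact hgbefore j (by omega) (by rw [List.getElem?_eq_getElem hjlen, hh])
      conv_lhs => rw [hdec]
      rw [aScan_append hd hfree]
      have hlen : ((l.take lt.toNat).length : Int) = lt := by simp; omega
      rw [aScan_cons]
      simp only [Char.reduceEq, reduceIte]
      rw [if_neg (show ¬ d + 1 = 0 by omega)]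
      rw [scan_eq (l.drop (lt.toNat + 1)) (d + 1) (by omega)]
      cases bScan (l.drop (lt.toNat + 1)) (d + 1)
      · rfl
      · simp only [Option.map_some, Option.some.injEq, hlen]
        ring
    · -- nearest bracket is '>' at gt
      simp only [dif_neg hlt]
      have hgn : l[gt.toNat]? = some '>' := hgat
      have hdec : l = l.take gt.toNat ++ '>' :: l.drop (gt.toNat + 1) := by
        conv_lhs => rw [← List.take_append_drop gt.toNat l]
        rw [List.drop_eq_getElem_cons (by omega : gt.toNat < l.length)]
        have : l[gt.toNat] = '>' := by
          have := hgn; rw [List.getElem?_eq_getElem (by omega : gt.toNat < l.length)] at this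
          exact Option.some.inj this
        rw [this]
      have hfree : ∀ c ∈ l.take gt.toNat, c ≠ '<' ∧ c ≠ '>' := by
        intro c hc
        obtain ⟨j, hj, rfl⟩ := List.mem_iff_getElem.mp hc
        have hjlen : j < l.length := by simp at hj; omega
        have hjgt : j < gt.toNat := by simp at hj; omega
        have hget : (l.take gt.toNat)[j] = l[j] := List.getElem_take
        rw [hget]
        constructor
        · intro hh
          -- a '<' before gt would make lt ≠ -1 and lt < gt
          have hmem : '<' ∈ l := by
            rw [← hh]; exact List.getElem_mem hjlen
          have hltne : lt ≠ -1 := fun hq => (find_singleton_neg.mp hq) hmem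
          have hlt0 : 0 ≤ lt := by have := PySem.Chars.neg_one_le_find l ['<']; omega
          obtain ⟨_, hlbefore⟩ := find_singleton_spec (c := '<') (l := l) hltne
          have : ¬ j < lt.toNat := fun hq => hlbefore j hq (by rw [List.getElem?_eq_getElem hjlen, hh])
          have : gt < lt := by
            rcases not_and_or.mp hlt with hq | hq
            · exact absurd hltne hq
            · have hne : lt ≠ gt := by
                intro he
                have : l[lt.toNat]? = some '<' := (find_singleton_spec hltne).1
                rw [he, hgn] at this
                simp at this
              omega
          omega
        · intro hh
          exact hgbefore j hjgt (by rw [List.getElem?_eq_getElem hjlen, hh])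
      conv_lhs => rw [hdec]
      rw [aScan_append hd hfree]
      have hlen : ((l.take gt.toNat).length : Int) = gt := by simp; omega
      rw [aScan_cons]
      simp only [Char.reduceEq, reduceIte]
      by_cases hd1 : d = 1
      · rw [if_pos (show d - 1 = 0 by omega), if_pos hd1]
        simp only [Option.map_some, Option.some.injEq, hlen]
        omega
      · rw [if_neg (show ¬ d - 1 = 0 by omega), if_neg hd1]
        rw [scan_eq (l.drop (gt.toNat + 1)) (d - 1) (by omega)]
        cases bScan (l.drop (gt.toNat + 1)) (d - 1)
        · rfl
        · simp only [Option.map_some, Option.some.injEq, hlen]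
          ring
termination_by l.length
decreasing_by
  all_goals
    have := find_lt_length_of_ne (s := l) (sub := ['>']) (by simp) hgt
    have := PySem.Chars.neg_one_le_find l ['>']
    simp only [List.length_drop]
    omega

lemma aLoop_spec (cs : List Char) (i d : Int) (hi : 0 ≤ i) (hd : 1 ≤ d) :
    (aScan (cs.drop i.toNat) d = none → 1 ≤ (aLoop cs i d).2) ∧
      (∀ k, aScan (cs.drop i.toNat) d = some k → aLoop cs i d = (i + k, 0)) := by
  rw [aLoop]
  by_cases hc : i < (cs.length : Int) ∧ 0 < d
  · simp only [dif_pos hc]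
    have hin : i.toNat < cs.length := by omega
    have hdrop : cs.drop i.toNat = cs[i.toNat] :: cs.drop (i.toNat + 1) :=
      List.drop_eq_getElem_cons hin
    have hget : PySem.List.pyGetD cs i '#' = cs[i.toNat] :=
      PySem.List.pyGetD_eq_getElem _ _ hi hc.1
    set c := cs[i.toNat] with hcdef
    set d' : Int := if c = '<' then d + 1 else if c = '>' then d - 1 else d with hd'
    clear_value d'
    have hscan : aScan (cs.drop i.toNat) d =
        if d' = 0 then some 1 else (aScan (cs.drop (i.toNat + 1)) d').map (· + 1) := by
      rw [hdrop, aScan_cons, ← hd']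
    simp only [hget, ← hd']
    by_cases hz : d' = 0
    · rw [hscan, if_pos hz]
      have hstop : aLoop cs (i + 1) d' = (i + 1, d') := by
        rw [aLoop]
        rw [dif_neg (show ¬ ((i + 1 : Int) < (cs.length : Int) ∧ 0 < d') by omega)]
      refine ⟨fun hq => by simp at hq, fun k hk => ?_⟩
      have hk1 : (1 : Int) = k := by simpa using hk
      have hik : i + 1 = i + k := by omega
      rw [hstop, hz, hik]
    · have hd'1 : 1 ≤ d' := by
        rw [hd'] at hz ⊢
        split_ifs at hz ⊢ <;> omega
      have htn : (i + 1).toNat = i.toNat + 1 := by omega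
      obtain ⟨ihn, ihs⟩ := aLoop_spec cs (i + 1) d' (by omega) hd'1
      rw [htn] at ihn ihs
      rw [hscan, if_neg hz]
      constructor
      · intro hnone
        cases he : aScan (cs.drop (i.toNat + 1)) d' with
        | none => exact ihn he
        | some k => rw [he] at hnone; simp at hnone
      · intro k hk
        cases he : aScan (cs.drop (i.toNat + 1)) d' with
        | none => rw [he] at hk; simp at hk
        | some k' =>
          rw [he] at hk; simp at hk
          rw [ihs k' he]
          have hik : i + 1 + k' = i + k := by omega
          rw [hik]
  · simp only [dif_neg hc]
    have hdropnil : cs.drop i.toNat = [] := by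
      apply List.drop_eq_nil_of_le; omega
    rw [hdropnil]
    exact ⟨fun _ => by simpa using hd, fun k hk => by simp [aScan] at hk⟩
termination_by ((cs.length : Int) - i).toNat
decreasing_by omega

lemma findFrom_of_gt_length (cs sub : List Char) (i : Int) (h : (cs.length : Int) < i) :
    PySem.Chars.findFrom cs sub i none = -1 := by
  unfold PySem.Chars.findFrom
  simp only
  rw [if_pos (by split <;> omega)]

lemma bLoop_spec (cs : List Char) (i d : Int) (hi : 0 ≤ i) (hd : 1 ≤ d) :
    bLoop cs i d = (bScan (cs.drop i.toNat) d).map (fun k => i + k) := by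
  rw [bLoop]
  simp only [dif_pos (by omega : (0:Int) < d)]
  by_cases hbig : (cs.length : Int) < i
  · have hgt := findFrom_of_gt_length cs ['>'] i hbig
    have hdropnil : cs.drop i.toNat = [] := List.drop_eq_nil_of_le (by omega)
    rw [hdropnil, bScan]
    have hfindnil : PySem.Chars.find ([] : List Char) ['>'] = -1 :=
      find_singleton_neg.mpr (by simp)
    simp [hgt, hfindnil]
  · have hle : i.toNat ≤ cs.length := by omega
    have hcast : i = ((i.toNat : Nat) : Int) := by omega
    set l := cs.drop i.toNat with hl
    have hflt : PySem.Chars.findFrom cs ['<'] i none =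
        if PySem.Chars.find l ['<'] = -1 then -1 else i + PySem.Chars.find l ['<'] := by
      rw [hcast, PySem.Chars.findFrom_natCast cs ['<'] i.toNat hle]
      try rw [← hcast]
      try rw [← hl]
    have hfgt : PySem.Chars.findFrom cs ['>'] i none =
        if PySem.Chars.find l ['>'] = -1 then -1 else i + PySem.Chars.find l ['>'] := by
      rw [hcast, PySem.Chars.findFrom_natCast cs ['>'] i.toNat hle]
      try rw [← hcast]
      try rw [← hl]
    clear_value l
    rw [bScan]
    set fg := PySem.Chars.find l ['>'] with hfg
    set fl := PySem.Chars.find l ['<'] with hfldef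
    clear_value fg fl
    have hfg1 := PySem.Chars.neg_one_le_find l ['>']
    have hfl1 := PySem.Chars.neg_one_le_find l ['<']
    by_cases hgt : fg = -1
    · simp only [hflt, hfgt, if_pos hgt]
      simp [hgt]
    · have hfg0 : 0 ≤ fg := by omega
      have hfglen : fg < (l.length : Int) := by
        rw [hfg]
        exact find_lt_length_of_ne (by simp) (by rw [← hfg]; exact hgt)
      have hlenl : (l.length : Int) = (cs.length : Int) - i := by rw [hl]; simp; omega
      have hfgb : fg < (cs.length : Int) - i := by omega
      simp only [hflt, hfgt, if_neg hgt]
      rw [dif_neg (by omega : ¬ (i + fg = -1))]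
      rw [dif_neg hgt]
      by_cases hltb : fl ≠ -1 ∧ fl < fg
      · have hfl0 : 0 ≤ fl := by omega
        rw [dif_pos (by constructor <;> [rw [if_neg hltb.1]; rw [if_neg hltb.1]] <;> omega)]
        rw [dif_pos hltb]
        rw [if_neg hltb.1]
        have hrec := bLoop_spec cs (i + fl + 1) (d + 1) (by omega) (by omega)
        have hdd : cs.drop (i + fl + 1).toNat = l.drop (fl.toNat + 1) := by
          rw [hl, List.drop_drop]
          congr 1
          omega
        rw [hrec, hdd]
        cases bScan (l.drop (fl.toNat + 1)) (d + 1)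
        · rfl
        · simp only [Option.map_some, Option.some.injEq]
          omega
      · rw [dif_neg (by
            intro hq
            apply hltb
            rcases hq with ⟨hq1, hq2⟩
            by_cases hfln : fl = -1
            · rw [if_pos hfln] at hq1; exact absurd rfl hq1
            · rw [if_neg hfln] at hq2; exact ⟨hfln, by omega⟩)]
        rw [dif_neg hltb]
        by_cases hd1 : d = 1
        · subst hd1
          rw [if_pos rfl, bLoop]
          rw [dif_neg (by omega : ¬ (0:Int) < 1 - 1)]
          simp only [Option.map_some, Option.some.injEq]
          omega
        · rw [if_neg hd1]
          have hrec := bLoop_spec cs (i + fg + 1) (d - 1) (by omega) (by omega)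
          have hdd : cs.drop (i + fg + 1).toNat = l.drop (fg.toNat + 1) := by
            rw [hl, List.drop_drop]
            congr 1
            omega
          rw [hrec, hdd]
          cases bScan (l.drop (fg.toNat + 1)) (d - 1)
          · rfl
          · simp only [Option.map_some, Option.some.injEq]
            omega
termination_by ((cs.length : Int) - i).toNat
decreasing_by
  · omega
  · omega

-- ===== VERDICT (by name: the statement is the Claim_ definition above) =====
theorem extract_struct_definition_string_spec : Claim_equal_extract_struct_definition_string := by
  intro s sp _hdom hpre
  unfold Spec_extract_struct_definition_string
  unfold extract_struct_definition_string extract_struct_definition_string_alt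
  simp only [← skip_eq]
  set cs := s.toList with hcs
  by_cases h1 : ¬ (PySem.Chars.startswith (PySem.Chars.upper (PySem.List.slice cs (some sp) (some (sp + 7)))) "STRUCT".toList)
  · simp only [if_pos h1]
  · have hsp : 0 ≤ sp := by
      rcases hpre with hp | hp
      · exact hp
      · rw [hcs] at h1; exact absurd hp h1
    simp only [if_neg h1]
    set i := aSkip cs (sp + 6) with hi
    by_cases h2 : (cs.length : Int) ≤ i ∨ PySem.List.pyGetD cs i '#' ≠ '<'
    · simp only [if_pos h2]
    · simp only [if_neg h2]
      have hi0 : 0 ≤ i := by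
        have := aSkip_ge cs (sp + 6)
        omega
      have hbl := bLoop_spec cs (i + 1) 1 (by omega) le_rfl
      obtain ⟨han, has⟩ := aLoop_spec cs (i + 1) 1 (by omega) le_rfl
      rw [← scan_eq (cs.drop (i + 1).toNat) 1 le_rfl] at hbl
      cases he : aScan (cs.drop (i + 1).toNat) 1 with
      | none =>
        rw [he] at hbl
        have h2' := han he
        simp only [hbl, Option.map_none]
        rw [if_neg (by omega)]
      | some k =>
        rw [he] at hbl
        have h2' := has k he
        simp only [hbl, h2', Option.map_some]
        simp only [if_true]
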